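-- pv_equiv track=rewrite | github.com/BSanandu88/-Getting-Started-with-Competitive-Programming | week-1/reverseSort.py | reversSort
-- ===== SOURCE A (Python) =====
-- def reversSort(a):
--     cost = 0
--     for i in range(len(a)-1):
--         # find the min element
--         m = min(a[i:])
--         # find the index of the min element
--         m_index = a[i:].index(m)
--         # reverse from i to m_index
--         a[i:m_index + i + 1] = a[i : m_index + i + 1][::-1]
--         # keep track of cost
--         cost += len(a[i:m_index+ i + 1])
--     return cost
-- ===== SOURCE B (Python) =====
-- def reversSort(a):
--     # equivalence is about the return value: A sorts `a` in place, B leaves it untouched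
--     xs = list(a)
--     cost = 0
--     while len(xs) >= 2:
--         # one pass: first index (and value) of the minimum
--         j, m = 0, xs[0]
--         for k, v in enumerate(xs):
--             if v < m:
--                 j, m = k, v
--         cost += j + 1
--         # reversing xs[:j+1] puts the minimum in front; drop it and continue
--         xs = xs[:j][::-1] + xs[j+1:]
--     return cost
-- ===== Notes on version B (the rewrite author's own statement) =====
-- stated objective: simpler
-- what changed: A repeatedly calls min(), .index() and a slice assignment over the whole mutated array per loop index; B makes one combined first-argmin scan per step and recurses on the shrinking suffix without mutating the input, accumulating j+1 directly.
import Mathlib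
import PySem

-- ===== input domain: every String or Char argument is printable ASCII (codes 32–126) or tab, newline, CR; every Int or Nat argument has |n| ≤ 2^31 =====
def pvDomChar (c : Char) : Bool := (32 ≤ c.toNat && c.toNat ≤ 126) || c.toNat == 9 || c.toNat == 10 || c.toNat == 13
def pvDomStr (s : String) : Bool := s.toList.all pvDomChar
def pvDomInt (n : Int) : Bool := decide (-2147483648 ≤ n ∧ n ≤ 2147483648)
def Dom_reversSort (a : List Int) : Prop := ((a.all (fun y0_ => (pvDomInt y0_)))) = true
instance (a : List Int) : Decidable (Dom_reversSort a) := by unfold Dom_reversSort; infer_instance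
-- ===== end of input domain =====

-- B replaces A's per-step min() + .index() + whole-array slice assignment by one first-argmin
-- scan and a recursion on the shrinking suffix (simpler decomposition; same return value).
-- A sorts its argument in place while B leaves it untouched: the equivalence proved here is
-- about the RETURN value only.

-- ===== PORT A =====
-- the new array after the slice assignment a[i:mi+i+1] = a[i:mi+i+1][::-1]
-- (exact for 0 ≤ i ≤ mi+i+1 ≤ len(a), which holds in A's loop; [::-1] is reverse,
--  cf. PySem.List.slice?_none_none_neg_one)
def newA (a : List Int) (i : Int) (mi : Nat) : List Int :=
  (a.take i.toNat ++ (PySem.List.slice a (some i) (some ((mi : Int) + i + 1))).reverse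
     ++ a.drop (mi + i.toNat + 1))

-- one iteration of A's loop body; the `none` branches are unreachable guards
-- (Python's min()/.index() raise only on an empty sequence, and a[i:] has length ≥ 2 here)
def stepA (st : List Int × Int) (i : Int) : List Int × Int :=
  match PySem.List.min? (PySem.List.slice st.1 (some i) none) (fun x => x) with
  | none => st
  | some m =>
    match PySem.List.index? (PySem.List.slice st.1 (some i) none) m with
    | none => st
    | some mi =>
      (newA st.1 i mi,
       st.2 + (PySem.List.slice (newA st.1 i mi) (some i) (some ((mi : Int) + i + 1))).length)

def reversSort (a : List Int) : Int :=
  ((PySem.List.pyRange 0 ((a.length : Int) - 1) 1).foldl stepA (a, 0)).2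

-- ===== PORT B =====
-- inner loop body: keep (index, value) of the first minimum seen so far
def stepScan (jm kv : Int × Int) : Int × Int := if kv.2 < jm.2 then kv else jm

-- characterisation of the scan (needed below for goAlt's termination, cited in decreasing_by)
theorem scan_eq (l : List Int) : ∀ (k j m : Int),
    (PySem.List.enumerate l k).foldl stepScan (j, m) =
      if l.foldl min m < m then (k + (l.idxOf (l.foldl min m) : Int), l.foldl min m)
      else (j, m) := by
  induction l with
  | nil => intro k j m; simp [PySem.List.enumerate_nil]
  | cons v t ih =>
    intro k j m
    rw [PySem.List.enumerate_cons]
    simp only [List.foldl_cons, stepScan]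
    by_cases hv : v < m
    · rw [if_pos hv]
      rw [ih (k+1) k v]
      have hminmv : min m v = v := by omega
      rw [hminmv]
      have hle : t.foldl min v ≤ v := (PySem.List.foldl_min_le t v).1
      by_cases h2 : t.foldl min v < v
      · rw [if_pos h2, if_pos (by omega)]
        have hne : v ≠ t.foldl min v := by omega
        rw [List.idxOf_cons_ne _ (by simpa using hne)]
        congr 1
        push_cast
        ring
      · have hev : t.foldl min v = v := by omega
        rw [if_neg h2, if_pos (by omega), hev, List.idxOf_cons_self]
        simp
    · rw [if_neg hv]
      rw [ih (k+1) j m]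
      have hminmv : min m v = m := by omega
      rw [hminmv]
      by_cases h2 : t.foldl min m < m
      · rw [if_pos h2, if_pos h2]
        have hne : v ≠ t.foldl min m := by omega
        rw [List.idxOf_cons_ne _ (by simpa using hne)]
        congr 1
        push_cast
        ring
      · rw [if_neg h2, if_neg h2]

theorem foldl_min_tail_mem (x y : Int) (t : List Int) :
    List.foldl min x (y :: t) ∈ (x :: y :: t) := by
  rcases PySem.List.foldl_min_mem (y :: t) x with h | h
  · rw [h]; exact List.mem_cons_self
  · exact List.mem_cons_of_mem _ h

-- the whole inner scan of B, started as in B's code, returns (first index of the minimum, minimum)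
theorem scan_result (x y : Int) (t : List Int) :
    (PySem.List.enumerate (x :: y :: t) 0).foldl stepScan (0, x)
      = (((x :: y :: t).idxOf (List.foldl min x (y :: t)) : Int), List.foldl min x (y :: t)) := by
  have h := scan_eq (x :: y :: t) 0 0 x
  have hf : List.foldl min x (x :: y :: t) = List.foldl min x (y :: t) := by
    simp [List.foldl_cons]
  rw [hf] at h
  have hle : List.foldl min x (y :: t) ≤ x := by
    have := (PySem.List.foldl_min_le (y :: t) x).1
    simpa using this
  by_cases hlt : List.foldl min x (y :: t) < x
  · rw [if_pos hlt] at h; rw [h]; simp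
  · have hex : List.foldl min x (y :: t) = x := by omega
    rw [if_neg hlt] at h
    rw [h, hex, List.idxOf_cons_self]
    simp

theorem scan_fst_lt (x y : Int) (t : List Int) :
    (((PySem.List.enumerate (x :: y :: t) 0).foldl stepScan (0, x)).1).toNat
      < (x :: y :: t).length := by
  rw [scan_result]
  simp only [Int.toNat_natCast]
  exact List.idxOf_lt_length_of_mem (foldl_min_tail_mem x y t)

-- the while loop: recursion on the suffix still to sort
def goAlt : List Int → Int
  | [] => 0
  | [_] => 0
  | x :: y :: t =>
    let s := x :: y :: t
    let jm := (PySem.List.enumerate s 0).foldl stepScan (0, x)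
    -- xs[:j][::-1] + xs[j+1:]  (j ≥ 0, so take/drop are exact)
    jm.1 + 1 + goAlt ((s.take jm.1.toNat).reverse ++ s.drop (jm.1.toNat + 1))
  termination_by l => l.length
  decreasing_by
    have h := scan_fst_lt x y t
    simp only [List.length_append, List.length_reverse, List.length_take, List.length_drop]
    simp only [List.length_cons] at h ⊢
    omega

def reversSort_alt (a : List Int) : Int := goAlt a

-- ===== PRECONDITION & SPEC =====
def Spec_reversSort (a : List Int) (out : Int) : Prop := out = reversSort_alt a
instance (a : List Int) (out : Int) : Decidable (Spec_reversSort a out) := by unfold Spec_reversSort; infer_instance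

-- ===== CLAIM (what is proved, stated in full; the proofs are below) =====
def Claim_equal_reversSort : Prop := ∀ (a : List Int), Dom_reversSort a → Spec_reversSort a (reversSort a)

-- ===== LEMMAS AND PROOFS =====

theorem getElem_ne_of_lt_idxOf' (s : List Int) (v : Int) (j : Nat) (hl : j < s.length)
    (hj : j < s.idxOf v) : ¬ s[j] = v := by
  induction s generalizing j with
  | nil => simp at hl
  | cons x t ih =>
    cases j with
    | zero => intro he; subst he; simp [List.idxOf_cons_self] at hj
    | succ j =>
      by_cases hx : x = v
      · subst hx; simp [List.idxOf_cons_self] at hj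
      · rw [List.idxOf_cons_ne _ (by simpa using hx)] at hj
        exact ih j (by simpa using hl) (by omega)

theorem index?_of_mem (s : List Int) (v : Int) (h : v ∈ s) :
    PySem.List.index? s v = some (s.idxOf v) := by
  rw [PySem.List.index?_eq_idxOf?, List.idxOf?_eq_some_iff]
  exact ⟨List.idxOf_lt_length_of_mem h, List.getElem_idxOf _,
    fun j hj => getElem_ne_of_lt_idxOf' s v j (by have := List.idxOf_lt_length_of_mem h; omega) hj⟩

-- one iteration of A's loop on a state p ++ s (p already sorted, |s| ≥ 2), at index i = |p|
theorem stepA_eq (p t : List Int) (x y : Int) (cost : Int) :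
    stepA (p ++ (x :: y :: t), cost) (p.length : Int) =
      ((p ++ [List.foldl min x (y :: t)]) ++
         (((x :: y :: t).take ((x :: y :: t).idxOf (List.foldl min x (y :: t)))).reverse ++
          (x :: y :: t).drop ((x :: y :: t).idxOf (List.foldl min x (y :: t)) + 1)),
       cost + (((x :: y :: t).idxOf (List.foldl min x (y :: t)) : Int) + 1)) := by
  set s : List Int := x :: y :: t with hs
  set M : Int := List.foldl min x (y :: t) with hM
  set jn : Nat := s.idxOf M with hjn
  have hMmem : M ∈ s := foldl_min_tail_mem x y t
  have hjlt : jn < s.length := List.idxOf_lt_length_of_mem hMmem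
  have hsM : s[jn] = M := List.getElem_idxOf hjlt
  have hslen : s.length = t.length + 2 := by simp [hs]
  unfold stepA
  simp only [PySem.List.slice_from_natCast, List.drop_left]
  rw [hs, PySem.List.min?_id_cons, ← hs, ← hM]
  simp only []
  rw [index?_of_mem s M hMmem, ← hjn]
  simp only []
  unfold newA
  have hb : ((jn : Int) + (p.length : Int) + 1) = ((p.length + (jn + 1) : Nat) : Int) := by
    push_cast; ring
  rw [hb, PySem.List.slice_natCast, List.drop_left]
  have htk : p.length + (jn + 1) - p.length = jn + 1 := by omega
  rw [htk]
  have hitoNat : ((p.length : Int)).toNat = p.length := Int.toNat_natCast _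
  rw [hitoNat, List.take_left]
  have hdrop : (p ++ s).drop (jn + p.length + 1) = s.drop (jn + 1) := by
    rw [List.drop_append]
    rw [List.drop_eq_nil_of_le (by omega)]
    simp only [List.nil_append]
    congr 1
    omega
  rw [hdrop]
  have hrevlen : ((s.take (jn + 1)).reverse).length = jn + 1 := by
    simp [List.length_take]; omega
  have hslice2 : PySem.List.slice (p ++ (s.take (jn + 1)).reverse ++ s.drop (jn + 1))
      (some (p.length : Int)) (some ((p.length + (jn + 1) : Nat) : Int))
      = (s.take (jn + 1)).reverse := by
    rw [PySem.List.slice_natCast]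
    rw [List.append_assoc, List.drop_left, htk]
    exact List.take_left' hrevlen
  rw [hslice2, hrevlen]
  have htake1 : s.take (jn + 1) = s.take jn ++ [M] := by
    rw [List.take_add_one]
    congr 1
    rw [List.getElem?_eq_getElem hjlt, hsM]
    rfl
  refine Prod.ext ?_ ?_
  · show p ++ (List.take (jn + 1) s).reverse ++ List.drop (jn + 1) s
        = p ++ [M] ++ ((List.take jn s).reverse ++ List.drop (jn + 1) s)
    rw [htake1]
    simp [List.reverse_append]
  · rfl

-- B's recursion unfolded on a suffix of length ≥ 2
theorem goAlt_cons (x y : Int) (t : List Int) :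
    goAlt (x :: y :: t) =
      (((x :: y :: t).idxOf (List.foldl min x (y :: t)) : Int) + 1) +
        goAlt (((x :: y :: t).take ((x :: y :: t).idxOf (List.foldl min x (y :: t)))).reverse ++
               (x :: y :: t).drop ((x :: y :: t).idxOf (List.foldl min x (y :: t)) + 1)) := by
  rw [goAlt]
  simp only [scan_result, Int.toNat_natCast]

-- A's loop, from index |p| on state p ++ s, adds exactly goAlt s to the cost
theorem loop_eq (n : Nat) : ∀ (s p : List Int) (cost : Int), s.length = n →
    ((PySem.List.pyRange (p.length) ((p.length : Int) + (s.length : Int) - 1) 1).foldl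
        stepA (p ++ s, cost)).2 = cost + goAlt s := by
  induction n with
  | zero =>
    intro s p cost hlen
    have hnil : s = [] := List.eq_nil_of_length_eq_zero hlen
    subst hnil
    rw [PySem.List.pyRange_one_eq_nil (by simp)]
    simp [goAlt]
  | succ n ih =>
    intro s p cost hlen
    rcases s with _ | ⟨x, _ | ⟨y, t⟩⟩
    · simp at hlen
    · rw [PySem.List.pyRange_one_eq_nil (by simp)]
      simp [goAlt]
    · have hlt : (p.length : Int) < (p.length : Int) + ((x :: y :: t).length : Int) - 1 := by
        simp only [List.length_cons]
        push_cast
        omega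
      rw [PySem.List.pyRange_one_cons hlt, List.foldl_cons, stepA_eq]
      set s : List Int := x :: y :: t with hs
      set M : Int := List.foldl min x (y :: t) with hM
      set jn : Nat := s.idxOf M with hjn
      have hMmem : M ∈ s := foldl_min_tail_mem x y t
      have hjlt : jn < s.length := List.idxOf_lt_length_of_mem hMmem
      have hslen : s.length = n + 1 := hlen
      set s' : List Int := (s.take jn).reverse ++ s.drop (jn + 1) with hs'
      have hs'len : s'.length = n := by
        simp only [hs', List.length_append, List.length_reverse, List.length_take,
          List.length_drop]
        omega
      have hkey := ih s' (p ++ [M]) (cost + ((jn : Int) + 1)) hs'len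
      have hstart : ((p ++ [M]).length : Int) = (p.length : Int) + 1 := by
        simp
      have hend : ((p.length : Int) + 1) + (s'.length : Int) - 1
          = (p.length : Int) + (s.length : Int) - 1 := by
        rw [hs'len, hslen]
        push_cast
        ring
      rw [hstart, hend] at hkey
      rw [hkey, goAlt_cons, ← hM, ← hjn, ← hs']
      ring

-- ===== VERDICT (by name: the statement is the Claim_ definition above) =====
theorem reversSort_spec : Claim_equal_reversSort := by
  intro a _
  unfold Spec_reversSort reversSort reversSort_alt
  have h := loop_eq a.length a [] 0 rfl
  simpa using h
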